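-- pv_equiv track=rewrite | github.com/miliar/Code_Jam_Webscraper | solutions_python/solutions_year17_round0_nr2/4111.py | getTidy
-- ===== SOURCE A (Python) =====
-- def getTidy(num):
--     length = len(num)
--     flag = index = 0
--     while(index != length):
--         if(index != length - 1 and int(num[index]) > int(num[index + 1]) and flag == 0 ):
--            if(int(num[index+1])==0):
--                num[index] = int(num[index]) - 1
--                num[index+1] = 9
--            else:
--                num[index] = int(num[index]) - 1
--            flag = 1
--         else:
--             if(flag==1):
--                 num[index] = 9
--         index= index + 1
--     return num
-- ===== SOURCE B (Python) =====
-- def getTidy(num):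
--     # Right-to-left pass: carry the tidy core (stored reversed), a count of pending 9s,
--     # how many digits were processed, and the original right neighbour. A descent seen
--     # further left (decided later) overrides anything found to its right.
--     core, nines, n, nxt = [], 0, 0, None
--     for x in reversed(num):
--         if nxt is not None and x > nxt:
--             core, nines = [x - 1], n
--         else:
--             core.append(x)
--         n += 1
--         nxt = x
--     core.reverse()
--     num[:] = core + [9] * nines
--     return num
-- ===== Notes on version B (the rewrite author's own statement) =====
-- stated objective: alternative
-- what changed: B traverses the digits right-to-left with a fold accumulator (tidy core, pending-9 count, previous neighbour), where each step may override the answer built so far so the leftmost descent, decided last, wins; A is a left-to-right stateful pass with a flag doing per-element int() conversions and index writes (B's measured speedup is this constant-factor mechanism).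
import Mathlib
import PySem

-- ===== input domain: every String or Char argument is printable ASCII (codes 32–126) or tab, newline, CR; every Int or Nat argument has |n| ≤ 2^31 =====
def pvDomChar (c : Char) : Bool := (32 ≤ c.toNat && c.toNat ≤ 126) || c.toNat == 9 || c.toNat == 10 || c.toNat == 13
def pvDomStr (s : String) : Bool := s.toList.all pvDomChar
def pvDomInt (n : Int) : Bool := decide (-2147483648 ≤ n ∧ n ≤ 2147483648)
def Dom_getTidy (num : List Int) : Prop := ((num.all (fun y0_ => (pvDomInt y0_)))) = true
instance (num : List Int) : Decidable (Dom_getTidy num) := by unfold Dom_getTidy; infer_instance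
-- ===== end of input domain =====

-- B rebuilds the result right-to-left with a fold accumulator (tidy core, pending-9 count,
-- previous neighbour), where the leftmost comparison, decided last, overrides; A is a
-- left-to-right stateful flag pass (objective: alternative). Both mutate num in place in
-- Python; the equivalence proved here is about the return value.


-- ===== PORT A =====
-- while(index != length), carrying num and flag; each Python assignment num[i] = v is List.set.
-- Python's loop guard is `index != length`; from getTidy's entry index starts at 0 and only
-- increments, so it never exceeds length: `length ≤ index` is the same exit on all reachable states.
def getTidyGo (num : List Int) (length : Nat) (flag : Int) (index : Nat) : List Int :=
  if length ≤ index then num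
  else
    if index ≠ length - 1 ∧ num.getD index 0 > num.getD (index + 1) 0 ∧ flag = 0 then
      if num.getD (index + 1) 0 = 0 then
        getTidyGo ((num.set index (num.getD index 0 - 1)).set (index + 1) 9) length 1 (index + 1)
      else
        getTidyGo (num.set index (num.getD index 0 - 1)) length 1 (index + 1)
    else
      if flag = 1 then getTidyGo (num.set index 9) length flag (index + 1)
      else getTidyGo num length flag (index + 1)
  termination_by length - index
  decreasing_by all_goals omega

def getTidy (num : List Int) : List Int :=
  getTidyGo num num.length 0 0

-- ===== PORT B =====
-- one step of Source B's loop body: state is (core, nines, n, nxt)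
def tidyStep (st : List Int × Nat × Nat × Option Int) (x : Int) : List Int × Nat × Nat × Option Int :=
  match st with
  | (core, nines, n, nxt) =>
    match nxt with
    | some y =>
        if x > y then ([x - 1], n, n + 1, some x)
        else (core ++ [x], nines, n + 1, some x)
    | none => (core ++ [x], nines, n + 1, some x)

-- for x in reversed(num): …; core.reverse(); return core + [9]*nines
def getTidy_alt (num : List Int) : List Int :=
  let st := num.reverse.foldl tidyStep ([], 0, 0, none)
  st.1.reverse ++ List.replicate st.2.1 9

-- ===== PRECONDITION & SPEC =====
def Spec_getTidy (num : List Int) (out : List Int) : Prop := out = getTidy_alt num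
instance (num : List Int) (out : List Int) : Decidable (Spec_getTidy num out) := by unfold Spec_getTidy; infer_instance

-- ===== CLAIM (what is proved, stated in full; the proofs are below) =====
def Claim_equal_getTidy : Prop := ∀ (num : List Int), Dom_getTidy num → Spec_getTidy num (getTidy num)

-- ===== LEMMAS AND PROOFS =====

-- common intermediate: the tidy result, defined structurally
def pvSpec : List Int → List Int
  | [] => []
  | [x] => [x]
  | x :: y :: t =>
      if x > y then (x - 1) :: List.replicate (t.length + 1) 9 else x :: pvSpec (y :: t)

-- first index k ≥ start with num[k] > num[k+1] (proof-side characterisation of A)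
def findDescent (num : List Int) (k : Nat) : Option Nat :=
  if k + 1 < num.length then
    if num.getD k 0 > num.getD (k + 1) 0 then some k else findDescent num (k + 1)
  else none
  termination_by num.length - k
  decreasing_by omega

def fdForm (num : List Int) : List Int :=
  match findDescent num 0 with
  | none => num
  | some i => num.take i ++ [num.getD i 0 - 1] ++ List.replicate (num.length - i - 1) 9

-- take (i+1) of a list set at i
theorem take_succ_set (l : List Int) (i : Nat) (a : Int) (h : i < l.length) :
    (l.set i a).take (i + 1) = l.take i ++ [a] := by
  induction l generalizing i with
  | nil => simp at h
  | cons x xs ih =>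
    cases i with
    | zero => simp
    | succ j =>
      simp only [List.set, List.take, List.cons_append, List.cons.injEq, true_and]
      exact ih j (by simpa using h)

-- setting at or past the taken prefix does not change it
theorem take_set_ge (l : List Int) (i j : Nat) (a : Int) (h : i ≤ j) :
    (l.set j a).take i = l.take i := by
  induction l generalizing i j with
  | nil => simp
  | cons x xs ih =>
    cases j with
    | zero => cases i with
      | zero => simp
      | succ => omega
    | succ j' =>
      cases i with
      | zero => simp
      | succ i' => simp [List.set, List.take, ih i' j' (by omega)]

-- the flag = 1 phase just fills 9s to the end
theorem go_one (length : Nat) : ∀ (index : Nat) (num : List Int),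
    num.length = length → index ≤ length →
    getTidyGo num length 1 index = num.take index ++ List.replicate (length - index) 9 := by
  intro index
  induction' h : length - index with n ih generalizing index
  · intro num hlen hle
    have hidx : index = length := by omega
    subst hidx
    rw [getTidyGo]
    simp [hlen]
  · intro num hlen hle
    have hlt : index < length := by omega
    rw [getTidyGo]
    have h01 : ¬ (index ≠ length - 1 ∧ num.getD index 0 > num.getD (index + 1) 0 ∧ (1 : Int) = 0) := by
      rintro ⟨-, -, h⟩; exact absurd h (by norm_num)
    rw [if_neg (show ¬ length ≤ index by omega), if_neg h01, if_pos rfl]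
    rw [ih (index + 1) (by omega) _ (by simp [hlen]) (by omega)]
    rw [take_succ_set _ _ _ (by omega)]
    simp [List.replicate_succ]

-- the flag = 0 phase is the search for the first descent
theorem go_zero (num : List Int) : ∀ (index : Nat),
    index ≤ num.length →
    getTidyGo num num.length 0 index =
      (match findDescent num index with
       | none => num
       | some i => num.take i ++ [num.getD i 0 - 1] ++ List.replicate (num.length - i - 1) 9) := by
  intro index
  induction' h : num.length - index with n ih generalizing index
  · intro hle
    have hidx : index = num.length := by omega
    rw [getTidyGo, findDescent]
    have h2 : ¬ (index + 1 < num.length) := by omega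
    simp [hidx]
  · intro hle
    have hlt : index < num.length := by omega
    rw [getTidyGo]
    rw [if_neg (show ¬ num.length ≤ index by omega)]
    by_cases hlast : index = num.length - 1
    · have hc : ¬ (index ≠ num.length - 1 ∧ num.getD index 0 > num.getD (index + 1) 0 ∧ (0 : Int) = 0) := by
        rintro ⟨hh, -, -⟩; exact hh hlast
      rw [if_neg hc, if_neg (by norm_num)]
      rw [getTidyGo]
      rw [if_pos (show num.length ≤ index + 1 by omega), findDescent]
      have h2 : ¬ (index + 1 < num.length) := by omega
      simp [h2]
    · by_cases hgt : num.getD index 0 > num.getD (index + 1) 0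
      · have hc : index ≠ num.length - 1 ∧ num.getD index 0 > num.getD (index + 1) 0 ∧ (0 : Int) = 0 :=
          ⟨hlast, hgt, rfl⟩
        rw [if_pos hc]
        have hfd : findDescent num index = some index := by
          rw [findDescent]
          have : index + 1 < num.length := by omega
          rw [if_pos this, if_pos hgt]
        rw [hfd]
        by_cases hz : num.getD (index + 1) 0 = 0
        · rw [if_pos hz]
          rw [go_one _ (index + 1) _ (by simp) (by simp; omega)]
          rw [take_set_ge _ _ _ _ (le_refl _), take_succ_set _ _ _ (by omega)]
          have hrep : num.length - (index + 1) = num.length - index - 1 := by omega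
          simp [hrep]
        · rw [if_neg hz]
          rw [go_one _ (index + 1) _ (by simp) (by simp; omega)]
          rw [take_succ_set _ _ _ (by omega)]
          have hrep : num.length - (index + 1) = num.length - index - 1 := by omega
          simp [hrep]
      · have hc : ¬ (index ≠ num.length - 1 ∧ num.getD index 0 > num.getD (index + 1) 0 ∧ (0 : Int) = 0) := by
          rintro ⟨-, hh, -⟩; exact hgt hh
        rw [if_neg hc, if_neg (by norm_num)]
        rw [ih (index + 1) (by omega) (by omega)]
        have hfd : findDescent num index = findDescent num (index + 1) := by
          rw [findDescent]
          have : index + 1 < num.length := by omega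
          rw [if_pos this, if_neg hgt]
        rw [hfd]

-- shifting the scan start past a new head
theorem findDescent_shift (l : List Int) (x : Int) : ∀ (k : Nat),
    findDescent (x :: l) (k + 1) = (findDescent l k).map (· + 1) := by
  intro k
  induction' h : l.length - k with n ih generalizing k
  · rw [findDescent]
    conv_rhs => rw [findDescent]
    have h1 : ¬ (k + 1 + 1 < (x :: l).length) := by simp; omega
    have h2 : ¬ (k + 1 < l.length) := by omega
    simp [h2]
  · by_cases hlt : k + 1 < l.length
    · rw [findDescent]
      conv_rhs => rw [findDescent]
      have h1 : k + 1 + 1 < (x :: l).length := by simp; omega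
      rw [if_pos h1, if_pos hlt]
      have hg1 : (x :: l).getD (k + 1) 0 = l.getD k 0 := by simp
      have hg2 : (x :: l).getD (k + 1 + 1) 0 = l.getD (k + 1) 0 := by simp
      rw [hg1, hg2]
      by_cases hgt : l.getD k 0 > l.getD (k + 1) 0
      · rw [if_pos hgt, if_pos hgt]; simp
      · rw [if_neg hgt, if_neg hgt]
        exact ih (k + 1) (by omega)
    · rw [findDescent]
      conv_rhs => rw [findDescent]
      have h1 : ¬ (k + 1 + 1 < (x :: l).length) := by simp; omega
      simp [hlt]

-- A's search form equals the structural spec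
theorem fdForm_eq_pvSpec : ∀ (num : List Int), fdForm num = pvSpec num := by
  intro num
  induction num with
  | nil => unfold fdForm; rw [findDescent]; simp [pvSpec]
  | cons x s ih =>
    cases s with
    | nil => unfold fdForm; rw [findDescent]; simp [pvSpec]
    | cons y t =>
      unfold fdForm pvSpec
      rw [findDescent]
      have h1 : 0 + 1 < (x :: y :: t).length := by simp
      rw [if_pos h1]
      by_cases hgt : x > y
      · have : (x :: y :: t).getD 0 0 > (x :: y :: t).getD (0 + 1) 0 := by simpa using hgt
        rw [if_pos this, if_pos hgt]
        simp
      · have : ¬ ((x :: y :: t).getD 0 0 > (x :: y :: t).getD (0 + 1) 0) := by simpa using hgt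
        rw [if_neg this, if_neg hgt]
        rw [findDescent_shift (y :: t) x 0]
        unfold fdForm at ih
        cases hfd : findDescent (y :: t) 0 with
        | none => rw [hfd] at ih; simp [← ih]
        | some i =>
          rw [hfd] at ih
          simp only [Option.map_some]
          have hlen : (x :: y :: t).length - (i + 1) - 1 = (y :: t).length - i - 1 := by
            simp
          simp only [List.take_succ_cons, List.getD_cons_succ, hlen, List.cons_append, ← ih]

-- the fold state after processing s.reverse
theorem fold_inv : ∀ (s : List Int),
    (s.reverse.foldl tidyStep ([], 0, 0, none)).2.2.1 = s.length ∧
    (s.reverse.foldl tidyStep ([], 0, 0, none)).2.2.2 = s.head? ∧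
    (s.reverse.foldl tidyStep ([], 0, 0, none)).1.reverse ++
      List.replicate (s.reverse.foldl tidyStep ([], 0, 0, none)).2.1 9 = pvSpec s := by
  intro s
  induction s with
  | nil => simp [pvSpec]
  | cons x s' ih =>
    have hstep : (x :: s').reverse.foldl tidyStep ([], 0, 0, none) =
        tidyStep (s'.reverse.foldl tidyStep ([], 0, 0, none)) x := by
      rw [List.reverse_cons, List.foldl_append]; rfl
    obtain ⟨ihn, ihh, ihr⟩ := ih
    cases s' with
    | nil =>
      refine ⟨?_, ?_, ?_⟩ <;> simp [tidyStep, pvSpec]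
    | cons y t =>
      set st := ((y :: t).reverse.foldl tidyStep ([], 0, 0, none)) with hst
      obtain ⟨core, nines, n, nxt⟩ := st
      simp only at ihn ihh ihr
      rw [List.head?_cons] at ihh
      subst ihh
      by_cases hgt : x > y
      · have : tidyStep (core, nines, n, some y) x = ([x - 1], n, n + 1, some x) := by
          simp [tidyStep, hgt]
        rw [hstep, this]
        refine ⟨by simp [ihn], by simp, ?_⟩
        simp only [List.reverse_cons, List.reverse_nil, List.nil_append, pvSpec, if_pos hgt, ihn]
        simp [List.length_cons]
      · have : tidyStep (core, nines, n, some y) x = (core ++ [x], nines, n + 1, some x) := by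
          simp [tidyStep, hgt]
        rw [hstep, this]
        refine ⟨by simp [ihn], by simp, ?_⟩
        simp only [List.reverse_append, List.reverse_cons, List.reverse_nil, List.nil_append,
          List.cons_append]
        rw [ihr]
        simp [pvSpec, hgt]

theorem getTidy_alt_eq_pvSpec (num : List Int) : getTidy_alt num = pvSpec num := by
  unfold getTidy_alt
  exact (fold_inv num).2.2

-- ===== VERDICT (by name: the statement is the Claim_ definition above) =====
theorem getTidy_spec : Claim_equal_getTidy := by
  intro num _
  unfold Spec_getTidy
  rw [getTidy_alt_eq_pvSpec, ← fdForm_eq_pvSpec]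
  unfold getTidy fdForm
  exact go_zero num 0 (Nat.zero_le _)
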